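-- pv_equiv track=rewrite | github.com/nativemen/leetcode | 2560. House Robber IV/main.py | canRob
-- ===== SOURCE A (Python) =====
-- from typing import List
-- from typing import List
--
-- def canRob(nums: List[int], cap: int, k: int) -> bool:
--     count = 0
--     index = 0
--     while index < len(nums):
--         if nums[index] <= cap:
--             count += 1
--             index += 2
--         else:
--             index += 1
--
--     return count >= k
-- ===== SOURCE B (Python) =====
-- from typing import List
--
-- def canRob(nums: List[int], cap: int, k: int) -> bool:
--     # House-Robber DP: prev = best count of non-adjacent affordable houses in the
--     # prefix so far, prev_prev = same for the prefix without its last house.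
--     prev_prev = 0
--     prev = 0
--     for x in nums:
--         if x <= cap:
--             cur = max(prev, prev_prev + 1)
--         else:
--             cur = prev
--         prev_prev, prev = prev, cur
--     return prev >= k
-- ===== Notes on version B (the rewrite author's own statement) =====
-- stated objective: alternative
-- what changed: Replaces the greedy take-and-skip index scan with a House-Robber dynamic-programming pass keeping two rolling values (best non-adjacent count up to the previous house and the one before), which equals the greedy count by optimality of the greedy on a path.
import Mathlib
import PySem

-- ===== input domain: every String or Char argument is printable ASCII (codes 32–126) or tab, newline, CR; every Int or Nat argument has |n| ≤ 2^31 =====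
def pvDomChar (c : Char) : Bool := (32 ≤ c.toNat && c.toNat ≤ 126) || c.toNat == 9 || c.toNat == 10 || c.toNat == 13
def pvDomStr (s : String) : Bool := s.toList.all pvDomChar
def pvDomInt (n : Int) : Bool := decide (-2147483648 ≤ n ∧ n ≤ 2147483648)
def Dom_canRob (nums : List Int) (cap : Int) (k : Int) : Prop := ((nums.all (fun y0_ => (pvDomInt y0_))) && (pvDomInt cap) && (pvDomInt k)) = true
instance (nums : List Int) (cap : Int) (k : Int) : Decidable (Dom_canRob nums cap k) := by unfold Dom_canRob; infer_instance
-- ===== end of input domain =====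

-- B replaces A's greedy take-and-skip scan by the House-Robber DP with two rolling values; same O(n) cost, alternative algorithm.

-- ===== PORT A =====
-- the while loop of A: state (count, index), index advances by 2 on a take, by 1 otherwise
def canRobLoop (nums : List Int) (cap : Int) (count : Int) (index : Nat) : Int :=
  if h : index < nums.length then
    if nums[index] ≤ cap then canRobLoop nums cap (count + 1) (index + 2)
    else canRobLoop nums cap count (index + 1)
  else count
termination_by nums.length - index
decreasing_by all_goals omega

def canRob (nums : List Int) (cap : Int) (k : Int) : Bool :=
  decide (canRobLoop nums cap 0 0 ≥ k)

-- ===== PORT B =====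
-- one fold over the houses carrying (prev_prev, prev) exactly as in Source B
def canRobStep (cap : Int) (st : Int × Int) (x : Int) : Int × Int :=
  (st.2, if x ≤ cap then max st.2 (st.1 + 1) else st.2)

def canRob_alt (nums : List Int) (cap : Int) (k : Int) : Bool :=
  decide ((nums.foldl (canRobStep cap) (0, 0)).2 ≥ k)

-- ===== PRECONDITION & SPEC =====
def Spec_canRob (nums : List Int) (cap : Int) (k : Int) (out : Bool) : Prop := out = canRob_alt nums cap k
instance (nums : List Int) (cap : Int) (k : Int) (out : Bool) : Decidable (Spec_canRob nums cap k out) := by unfold Spec_canRob; infer_instance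

-- ===== CLAIM (what is proved, stated in full; the proofs are below) =====
def Claim_equal_canRob : Prop := ∀ (nums : List Int) (cap : Int) (k : Int), Dom_canRob nums cap k → Spec_canRob nums cap k (canRob nums cap k)

-- ===== LEMMAS AND PROOFS =====

-- M l = size of a maximum independent set (non-adjacent selection) of houses with value ≤ cap in l
def M (cap : Int) : List Int → Int
  | [] => 0
  | x :: xs => if x ≤ cap then max (M cap xs) (1 + M cap xs.tail) else M cap xs
termination_by l => l.length
decreasing_by all_goals (simp [List.length_tail]; try omega)

-- A's greedy count, as structural recursion on the list
def G (cap : Int) : List Int → Int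
  | [] => 0
  | x :: xs => if x ≤ cap then 1 + G cap xs.tail else G cap xs
termination_by l => l.length
decreasing_by all_goals (simp [List.length_tail]; try omega)

lemma len_tail_le (l : List Int) : l.tail.length ≤ l.length := by
  cases l <;> simp

lemma M_tail_le (cap : Int) (l : List Int) : M cap l.tail ≤ M cap l := by
  cases l with
  | nil => simp
  | cons y t =>
    rw [M]
    split <;> simp

lemma M_le_one_add_tail (cap : Int) (l : List Int) : M cap l ≤ 1 + M cap l.tail := by
  cases l with
  | nil => simp [M]
  | cons y t =>
    rw [M]
    have h := M_tail_le cap t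
    split <;> simp only [List.tail_cons] <;> omega

lemma G_eq_M (cap : Int) : ∀ n (l : List Int), l.length ≤ n → G cap l = M cap l := by
  intro n
  induction n with
  | zero =>
    intro l h
    have hl : l = [] := List.eq_nil_of_length_eq_zero (by omega)
    subst hl; simp [G, M]
  | succ n ih =>
    intro l h
    cases l with
    | nil => simp [G, M]
    | cons x xs =>
      rw [G, M]
      have h1 : xs.length ≤ n := by simpa using h
      have h2 : xs.tail.length ≤ n := le_trans (len_tail_le xs) h1
      have hle := M_le_one_add_tail cap xs
      rw [ih xs h1, ih xs.tail h2]
      split <;> omega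

lemma canRobLoop_eq (nums : List Int) (cap : Int) :
    ∀ fuel index count, nums.length - index ≤ fuel →
      canRobLoop nums cap count index = count + G cap (nums.drop index) := by
  intro fuel
  induction fuel with
  | zero =>
    intro index count h
    have hge : nums.length ≤ index := by omega
    rw [canRobLoop]
    simp [Nat.not_lt_of_le hge, List.drop_eq_nil_of_le hge, G]
  | succ fuel ih =>
    intro index count h
    rw [canRobLoop]
    by_cases hlt : index < nums.length
    · have hd : nums.drop index = nums[index] :: nums.drop (index + 1) :=
        List.drop_eq_getElem_cons hlt
      have ht : (nums.drop (index + 1)).tail = nums.drop (index + 2) := by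
        rw [← List.drop_drop]; simp [List.tail_drop]
      rw [dif_pos hlt]
      by_cases hc : nums[index] ≤ cap
      · rw [if_pos hc, ih (index + 2) (count + 1) (by omega), hd, G, if_pos hc, ht]
        ring
      · rw [if_neg hc, ih (index + 1) count (by omega), hd, G, if_neg hc]
    · rw [dif_neg hlt]
      have hge : nums.length ≤ index := by omega
      simp [List.drop_eq_nil_of_le hge, G]

lemma tail_dropLast (z : Int) (s : List Int) :
    ((z :: s).dropLast).tail = s.dropLast := by
  cases s <;> simp

-- snoc recurrence for M, matching one DP step
lemma M_snoc (cap x : Int) : ∀ n (l : List Int), l.length ≤ n →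
    M cap (l ++ [x]) = if x ≤ cap then max (M cap l) (M cap l.dropLast + 1) else M cap l := by
  intro n
  induction n with
  | zero =>
    intro l h
    have : l = [] := by cases l <;> simp_all
    subst this
    simp [M]
  | succ n ih =>
    intro l h
    cases l with
    | nil => simp [M]
    | cons y t =>
      have h1 : t.length ≤ n := by simpa using h
      have h2 : t.tail.length ≤ n := le_trans (len_tail_le t) h1
      have hy : (y :: t) ++ [x] = y :: (t ++ [x]) := by simp
      rw [hy, M, ih t h1]
      have htail : (t ++ [x]).tail = t.tail ++ [x] ∨ (t = [] ∧ (t ++ [x]).tail = []) := by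
        cases t <;> simp
      cases htail with
      | inl he =>
        rw [he, ih t.tail h2]
        cases t with
        | nil => simp_all
        | cons z s =>
          simp only [List.tail_cons]
          have e1 : M cap (y :: z :: s) =
              if y ≤ cap then max (M cap (z :: s)) (1 + M cap s) else M cap (z :: s) := by
            rw [M]; simp only [List.tail_cons]
          have e2 : M cap ((y :: z :: s).dropLast) =
              if y ≤ cap then max (M cap ((z :: s).dropLast)) (1 + M cap s.dropLast)
              else M cap ((z :: s).dropLast) := by
            rw [List.dropLast_cons₂, M, tail_dropLast]
          rw [e1, e2]
          split_ifs <;> omega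
      | inr he =>
        obtain ⟨ht0, he⟩ := he
        subst ht0
        simp [M]
        split_ifs <;> omega

lemma foldl_eq_M (cap : Int) (l : List Int) :
    l.foldl (canRobStep cap) (0, 0) = (M cap l.dropLast, M cap l) := by
  induction l using List.reverseRecOn with
  | nil => simp [M]
  | append_singleton l x ih =>
    rw [List.foldl_append, ih]
    simp only [List.foldl_cons, List.foldl_nil, canRobStep, List.dropLast_concat]
    rw [M_snoc cap x l.length l le_rfl]

-- ===== VERDICT (by name: the statement is the Claim_ definition above) =====
theorem canRob_spec : Claim_equal_canRob := by
  intro nums cap k _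
  unfold Spec_canRob canRob canRob_alt
  rw [canRobLoop_eq nums cap nums.length 0 0 (by omega), foldl_eq_M,
      G_eq_M cap nums.length _ (by simp)]
  simp
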